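-- pv_equiv track=rewrite | github.com/qdotdash/Competitive_Coding | Data Structures and Algorithms - Udemy/Arrays Exercises/7. sumPairGoogle.py | dictionaryIfUnordered
-- ===== SOURCE A (Python) =====
-- sum2 = 3
--
-- def dictionaryIfUnordered(list2): #O(n)
-- 	mapOfList2 = {}
-- 	for x in list2:
-- 		if(x in mapOfList2):
-- 			return True
-- 		else:
-- 			mapOfList2[sum2-x] = True
--
-- 	return False
-- ===== SOURCE B (Python) =====
-- sum2 = 3
--
-- def dictionaryIfUnordered(list2):  # brute-force O(n^2) pairwise scan, no auxiliary map
-- 	for i, x in enumerate(list2):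
-- 		for y in list2[i + 1:]:
-- 			if x + y == sum2:
-- 				return True
-- 	return False
-- ===== Notes on version B (the rewrite author's own statement) =====
-- stated objective: alternative
-- what changed: Replaced the single-pass complement-dictionary scan with a nested-loop brute-force search over all index pairs i<j, maintaining no auxiliary map.
import Mathlib
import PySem

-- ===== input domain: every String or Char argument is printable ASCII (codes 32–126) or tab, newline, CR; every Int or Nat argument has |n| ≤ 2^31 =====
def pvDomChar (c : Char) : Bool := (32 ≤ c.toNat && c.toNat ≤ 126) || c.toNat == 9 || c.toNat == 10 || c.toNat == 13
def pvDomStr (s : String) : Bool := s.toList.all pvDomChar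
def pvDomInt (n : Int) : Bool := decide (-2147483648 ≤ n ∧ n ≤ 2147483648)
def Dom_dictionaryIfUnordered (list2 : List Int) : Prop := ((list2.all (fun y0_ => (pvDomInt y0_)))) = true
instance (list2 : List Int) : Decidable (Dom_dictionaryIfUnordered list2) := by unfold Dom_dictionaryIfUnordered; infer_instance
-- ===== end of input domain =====

-- B replaces A's one-pass complement-dictionary scan by a nested-loop brute-force pairwise search (alternative decomposition, no auxiliary map).

-- ===== PORT A =====
-- module constant 'sum2 = 3'
def pvSum2 : Int := 3

-- A's for-loop with early 'return True', carrying the dict 'mapOfList2'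
def dictALoop : List Int → PySem.Dict Int Bool → Bool
  | [], _ => false
  | x :: rest, d =>
    if d.contains x then true
    else dictALoop rest (d.insert (pvSum2 - x) true)

def dictionaryIfUnordered (list2 : List Int) : Bool :=
  dictALoop list2 PySem.Dict.empty

-- ===== PORT B =====
-- inner loop: 'for y in list2[i+1:]: if x + y == sum2: return True'
def dictBInner (x : Int) : List Int → Bool
  | [] => false
  | y :: ys => if x + y == pvSum2 then true else dictBInner x ys

-- outer loop: 'for i, x in enumerate(list2): …' — the elements after x are list2[i+1:]
def dictBOuter : List Int → Bool
  | [] => false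
  | x :: rest => if dictBInner x rest then true else dictBOuter rest

def dictionaryIfUnordered_alt (list2 : List Int) : Bool :=
  dictBOuter list2

-- ===== PRECONDITION & SPEC =====
def Spec_dictionaryIfUnordered (list2 : List Int) (out : Bool) : Prop := out = dictionaryIfUnordered_alt list2
instance (list2 : List Int) (out : Bool) : Decidable (Spec_dictionaryIfUnordered list2 out) := by unfold Spec_dictionaryIfUnordered; infer_instance

-- ===== CLAIM (what is proved, stated in full; the proofs are below) =====
def Claim_equal_dictionaryIfUnordered : Prop := ∀ (list2 : List Int), Dom_dictionaryIfUnordered list2 → Spec_dictionaryIfUnordered list2 (dictionaryIfUnordered list2)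

-- ===== LEMMAS AND PROOFS =====

lemma dictBInner_eq_true_iff (x : Int) (ys : List Int) :
    dictBInner x ys = true ↔ ∃ y ∈ ys, x + y = pvSum2 := by
  induction ys with
  | nil => simp [dictBInner]
  | cons y ys ih =>
    by_cases h : x + y = pvSum2
    · simp [dictBInner, h]
    · simp [dictBInner, h, ih]

/-- Invariant lemma: if `d.contains k` says exactly "k is the complement of some seen
element of `s`", then A's remaining loop finds a pair iff there is a cross pair
between `s` and `xs` or a pair inside `xs` (which is what B's outer loop decides). -/
lemma dictALoop_iff (xs : List Int) : ∀ (d : PySem.Dict Int Bool) (s : List Int),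
    (∀ k, d.contains k = true ↔ ∃ y ∈ s, pvSum2 - y = k) →
    (dictALoop xs d = true ↔ (∃ y ∈ s, ∃ x ∈ xs, y + x = pvSum2) ∨ dictBOuter xs = true) := by
  induction xs with
  | nil => intro d s _; simp [dictALoop, dictBOuter]
  | cons x rest ih =>
    intro d s hinv
    by_cases h : d.contains x = true
    · obtain ⟨y, hy, hyx⟩ := (hinv x).mp h
      simp only [dictALoop, h]
      constructor
      · intro _
        exact Or.inl ⟨y, hy, x, List.mem_cons_self, by omega⟩
      · intro _; rfl
    · have hno : ¬ ∃ y ∈ s, y + x = pvSum2 := by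
        intro ⟨y, hy, hyx⟩
        exact h ((hinv x).mpr ⟨y, hy, by omega⟩)
      have hinv' : ∀ k, (d.insert (pvSum2 - x) true).contains k = true ↔
          ∃ y ∈ s ++ [x], pvSum2 - y = k := by
        intro k
        rw [PySem.Dict.contains_insert]
        simp only [Bool.or_eq_true, beq_iff_eq, hinv k, List.mem_append,
          List.mem_singleton]
        constructor
        · rintro (hk | ⟨y, hy, hyk⟩)
          · exact ⟨x, Or.inr rfl, hk.symm⟩
          · exact ⟨y, Or.inl hy, hyk⟩
        · rintro ⟨y, (hy | rfl), hyk⟩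
          · exact Or.inr ⟨y, hy, hyk⟩
          · exact Or.inl hyk.symm
      have hA : dictALoop (x :: rest) d = dictALoop rest (d.insert (pvSum2 - x) true) := by
        simp [dictALoop, h]
      rw [hA, ih _ (s ++ [x]) hinv']
      have hBO : dictBOuter (x :: rest) = true ↔
          dictBInner x rest = true ∨ dictBOuter rest = true := by
        by_cases hb : dictBInner x rest = true
        · simp [dictBOuter, hb]
        · simp [dictBOuter, hb]
      rw [hBO, dictBInner_eq_true_iff]
      constructor
      · rintro (⟨y, hy, z, hz, hyz⟩ | hrest)
        · rcases List.mem_append.mp hy with hy | hy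
          · exact Or.inl ⟨y, hy, z, List.mem_cons_of_mem _ hz, hyz⟩
          · have : y = x := List.mem_singleton.mp hy
            subst this
            exact Or.inr (Or.inl ⟨z, hz, hyz⟩)
        · exact Or.inr (Or.inr hrest)
      · rintro (⟨y, hy, z, hz, hyz⟩ | hpair | hrest)
        · rcases List.mem_cons.mp hz with rfl | hz
          · exact absurd ⟨y, hy, hyz⟩ hno
          · exact Or.inl ⟨y, List.mem_append.mpr (Or.inl hy), z, hz, hyz⟩
        · obtain ⟨z, hz, hxz⟩ := hpair
          exact Or.inl ⟨x, List.mem_append.mpr (Or.inr (List.mem_singleton.mpr rfl)), z, hz, hxz⟩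
        · exact Or.inr hrest

-- ===== VERDICT (by name: the statement is the Claim_ definition above) =====
theorem dictionaryIfUnordered_spec : Claim_equal_dictionaryIfUnordered := by
  intro list2 _
  unfold Spec_dictionaryIfUnordered dictionaryIfUnordered dictionaryIfUnordered_alt
  rw [Bool.eq_iff_iff]
  rw [dictALoop_iff list2 PySem.Dict.empty []
    (by intro k; simp [PySem.Dict.contains_empty])]
  simp
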